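-- pv_equiv track=rewrite | github.com/nirajsuresh/OverBoard | OverBoard.py | condense_position
-- ===== SOURCE A (Python) =====
-- def condense_position(position):
--     position_split = position.split('/')
--     fixed_position_split = []
--     for line in position_split:
--         count = 0
--         new_line = ""
--         for ch in line:
--             if ch == '_':
--                 count += 1
--             else:
--                 if count != 0:
--                     new_line += str(count)
--                     count = 0
--                 new_line += ch
--         if count != 0:
--             new_line += str(count)
--         fixed_position_split.append(new_line)
--     return "/".join(fixed_position_split)
-- ===== SOURCE B (Python) =====
-- def condense_position(position):
--     def runs(s):
--         # yield maximal runs of identical characters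
--         while s:
--             k = 1
--             while k < len(s) and s[k] == s[0]:
--                 k += 1
--             yield s[:k]
--             s = s[k:]
--     return '/'.join(
--         ''.join(str(len(r)) if r[0] == '_' else r for r in runs(seg))
--         for seg in position.split('/'))
-- ===== Notes on version B (the rewrite author's own statement) =====
-- stated objective: alternative
-- what changed: Replaced the per-character counter state machine with run-grouping: each segment is decomposed into maximal runs of identical characters and each run is rendered at once (its length for underscores, the run itself otherwise).
import Mathlib
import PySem

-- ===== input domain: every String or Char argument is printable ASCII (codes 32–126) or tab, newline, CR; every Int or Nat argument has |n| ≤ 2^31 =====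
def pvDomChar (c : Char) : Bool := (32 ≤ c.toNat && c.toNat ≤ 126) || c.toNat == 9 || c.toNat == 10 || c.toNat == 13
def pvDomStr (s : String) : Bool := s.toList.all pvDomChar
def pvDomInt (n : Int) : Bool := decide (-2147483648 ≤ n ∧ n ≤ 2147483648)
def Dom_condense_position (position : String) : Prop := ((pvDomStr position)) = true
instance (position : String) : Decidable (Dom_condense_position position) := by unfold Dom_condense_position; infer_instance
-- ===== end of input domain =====

-- B replaces A's per-character underscore counter with run-grouping (maximal runs rendered at once); alternative decomposition, same cost.

-- ===== PORT A =====
-- one step of A's inner loop: state (count, new_line); strings carried as List Char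
def pvStepA (st : Int × List Char) (ch : Char) : Int × List Char :=
  if ch = '_' then (st.1 + 1, st.2)
  else ((0 : Int), (if st.1 ≠ 0 then st.2 ++ (PySem.Int.toStr st.1).toList else st.2) ++ [ch])

-- the trailing "if count != 0: new_line += str(count)"
def pvFlushA (st : Int × List Char) : List Char :=
  if st.1 ≠ 0 then st.2 ++ (PySem.Int.toStr st.1).toList else st.2

-- A's inner loop over one slash-separated segment, plus the trailing flush
def pvCondenseLineA (line : List Char) : List Char :=
  pvFlushA (line.foldl pvStepA ((0 : Int), []))

def condense_position (position : String) : String :=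
  String.ofList (PySem.Chars.join ['/']
    (((PySem.Chars.split? position.toList ['/']).getD []).map pvCondenseLineA))

-- ===== PORT B =====
-- B's runs(s): the inner counting loop is exactly 'take the maximal matching prefix' (takeWhile / dropWhile = s[:k] / s[k:])
def pvRuns (cs : List Char) : List (List Char) :=
  match cs with
  | [] => []
  | c :: rest => (c :: rest.takeWhile (· == c)) :: pvRuns (rest.dropWhile (· == c))
termination_by cs.length
decreasing_by simpa using Nat.lt_succ_of_le (List.length_dropWhile_le _ _)

-- str(len(r)) if r[0] == '_' else r
def pvPiece (r : List Char) : List Char :=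
  match r with
  | [] => []
  | c :: _ => if c = '_' then (PySem.Int.toStr r.length).toList else r

def pvCondenseLineB (cs : List Char) : List Char := ((pvRuns cs).map pvPiece).flatten

def condense_position_alt (position : String) : String :=
  String.ofList (PySem.Chars.join ['/']
    (((PySem.Chars.split? position.toList ['/']).getD []).map pvCondenseLineB))

-- ===== PRECONDITION & SPEC =====
def Spec_condense_position (position : String) (out : String) : Prop := out = condense_position_alt position
instance (position : String) (out : String) : Decidable (Spec_condense_position position out) := by unfold Spec_condense_position; infer_instance

-- ===== CLAIM (what is proved, stated in full; the proofs are below) =====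
def Claim_equal_condense_position : Prop := ∀ (position : String), Dom_condense_position position → Spec_condense_position position (condense_position position)

-- ===== LEMMAS AND PROOFS =====

-- the pending-underscore flush A emits when count = k
def pvEmit (k : Nat) : List Char := if k = 0 then [] else (PySem.Int.toStr (k : Int)).toList

-- A's inner loop as a direct recursion on the segment
def pvF : List Char → Nat → List Char
  | [], k => pvEmit k
  | c :: cs, k => if c = '_' then pvF cs (k + 1) else pvEmit k ++ [c] ++ pvF cs 0

theorem pvFoldA (cs : List Char) : ∀ (k : Nat) (acc : List Char),
    pvFlushA (cs.foldl pvStepA (((k : Nat) : Int), acc)) = acc ++ pvF cs k := by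
  induction cs with
  | nil =>
    intro k acc
    by_cases hk : k = 0
    · subst hk; simp [pvFlushA, pvF, pvEmit]
    · have hki : ((k : Nat) : Int) ≠ 0 := by exact_mod_cast hk
      simp [pvFlushA, pvF, pvEmit, hk]
  | cons c cs ih =>
    intro k acc
    by_cases hc : c = '_'
    · subst hc
      have h1 : pvStepA (((k : Nat) : Int), acc) '_' = ((((k + 1 : Nat) : Nat) : Int), acc) := by
        simp [pvStepA]
      rw [List.foldl_cons, h1, ih]
      simp [pvF]
    · have h1 : pvStepA (((k : Nat) : Int), acc) c
          = (((0 : Nat) : Int), (if k ≠ 0 then acc ++ (PySem.Int.toStr ((k : Nat) : Int)).toList else acc) ++ [c]) := by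
        simp only [pvStepA, hc, if_false, Nat.cast_zero]
        congr 1
        by_cases hk : k = 0
        · simp [hk]
        · simp [hk]
      rw [List.foldl_cons, h1, ih]
      by_cases hk : k = 0
      · subst hk; simp [pvF, hc, pvEmit]
      · simp [pvF, hc, pvEmit, hk, List.append_assoc]

theorem pvF_replicate_us (n : Nat) : ∀ (k : Nat) (rest : List Char),
    pvF (List.replicate n '_' ++ rest) k = pvF rest (k + n) := by
  induction n with
  | zero => intro k rest; simp
  | succ m ih =>
    intro k rest
    have hstep : pvF (List.replicate (m + 1) '_' ++ rest) k = pvF (List.replicate m '_' ++ rest) (k + 1) := by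
      simp [List.replicate_succ, pvF]
    rw [hstep, ih]
    have : k + 1 + m = k + (m + 1) := by omega
    rw [this]

theorem pvF_replicate_run (n : Nat) (c : Char) (hc : ¬ c = '_') : ∀ (rest : List Char),
    pvF (List.replicate n c ++ rest) 0 = List.replicate n c ++ pvF rest 0 := by
  induction n with
  | zero => intro rest; simp
  | succ m ih =>
    intro rest
    simp [List.replicate_succ, pvF, hc, pvEmit, ih]

theorem pvF_shift (rest : List Char) (k : Nat)
    (h : rest = [] ∨ ∃ d t, rest = d :: t ∧ ¬ d = '_') :
    pvF rest k = pvEmit k ++ pvF rest 0 := by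
  rcases h with h | ⟨d, t, rfl, hd⟩
  · subst h; simp [pvF, pvEmit]
  · simp [pvF, hd, pvEmit, List.append_assoc]

theorem pvRun_spec (c : Char) (rest : List Char) :
    rest.takeWhile (· == c) = List.replicate (rest.takeWhile (· == c)).length c :=
  List.eq_replicate_of_mem (fun b hb => by simpa using List.mem_takeWhile_imp hb)

theorem pvDrop_head (c : Char) (rest : List Char) :
    rest.dropWhile (· == c) = [] ∨
      ∃ d t, rest.dropWhile (· == c) = d :: t ∧ ¬ d = c := by
  cases hdt : rest.dropWhile (· == c) with
  | nil => exact Or.inl rfl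
  | cons d t =>
    refine Or.inr ⟨d, t, rfl, ?_⟩
    have h2 : rest.dropWhile (· == c) ≠ [] := by simp [hdt]
    have := List.head_dropWhile_not (· == c) h2
    simp only [hdt, List.head_cons] at this
    simpa using this

theorem pvLineAB (cs : List Char) : pvF cs 0 = pvCondenseLineB cs := by
  unfold pvCondenseLineB
  induction cs using pvRuns.induct with
  | case1 => simp [pvF, pvEmit, pvRuns]
  | case2 c rest ih =>
    have hsplit : rest.takeWhile (· == c) ++ rest.dropWhile (· == c) = rest :=
      List.takeWhile_append_dropWhile
    have hhead := pvDrop_head c rest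
    have hrun := pvRun_spec c rest
    rw [pvRuns, List.map_cons, List.flatten_cons]
    generalize hR : rest.dropWhile (· == c) = rest' at hsplit hhead ih ⊢
    generalize hn : (rest.takeWhile (· == c)).length = n at hrun
    rw [hrun] at hsplit ⊢
    rw [← ih, ← hsplit]
    by_cases hc : c = '_'
    · subst hc
      have h1 : pvF ('_' :: (List.replicate n '_' ++ rest')) 0
          = pvF (List.replicate (n + 1) '_' ++ rest') 0 := by
        simp [List.replicate_succ]
      rw [h1, pvF_replicate_us, pvF_shift rest' _ hhead]
      simp [pvPiece, pvEmit]
    · have h1 : pvF (c :: (List.replicate n c ++ rest')) 0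
          = [c] ++ pvF (List.replicate n c ++ rest') 0 := by
        simp [pvF, hc, pvEmit]
      rw [h1, pvF_replicate_run _ _ hc]
      simp [pvPiece, hc]

theorem pvLineA_eq_B : pvCondenseLineA = pvCondenseLineB := by
  funext cs
  have h := pvFoldA cs 0 []
  simp only [Nat.cast_zero, List.nil_append] at h
  rw [pvCondenseLineA, h, pvLineAB]

-- ===== VERDICT (by name: the statement is the Claim_ definition above) =====
theorem condense_position_spec : Claim_equal_condense_position := by
  intro position _
  unfold Spec_condense_position condense_position condense_position_alt
  rw [pvLineA_eq_B]
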